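-- pv_equiv track=rewrite | github.com/matthewdhanley/cube-ds | packet_processing.py | sort_packets
-- ===== SOURCE A (Python) =====
-- def sort_packets(packets):
--     packets_sorted = {}
--     for packet in packets:
--         packet_id = str(packet[0]) + str(packet[1])
--         if packet_id in packets_sorted:
--             packets_sorted[packet_id]['raw_packets'].append(packet)
--         else:
--             packets_sorted[packet_id] = {}
--             packets_sorted[packet_id]['raw_packets'] = [packet]
--     return packets_sorted
-- ===== SOURCE B (Python) =====
-- def sort_packets(packets):
--     keys = [str(p[0]) + str(p[1]) for p in packets]
--     return {k: {'raw_packets': [p for p, kk in zip(packets, keys) if kk == k]}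
--             for k in dict.fromkeys(keys)}
-- ===== Notes on version B (the rewrite author's own statement) =====
-- stated objective: alternative
-- what changed: A builds the grouping incrementally in one pass, appending to a mutable nested dict; B precomputes the key list once, takes the distinct keys in first-occurrence order with dict.fromkeys, and builds each group by filtering the packet list per key in a dict comprehension.
import Mathlib
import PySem

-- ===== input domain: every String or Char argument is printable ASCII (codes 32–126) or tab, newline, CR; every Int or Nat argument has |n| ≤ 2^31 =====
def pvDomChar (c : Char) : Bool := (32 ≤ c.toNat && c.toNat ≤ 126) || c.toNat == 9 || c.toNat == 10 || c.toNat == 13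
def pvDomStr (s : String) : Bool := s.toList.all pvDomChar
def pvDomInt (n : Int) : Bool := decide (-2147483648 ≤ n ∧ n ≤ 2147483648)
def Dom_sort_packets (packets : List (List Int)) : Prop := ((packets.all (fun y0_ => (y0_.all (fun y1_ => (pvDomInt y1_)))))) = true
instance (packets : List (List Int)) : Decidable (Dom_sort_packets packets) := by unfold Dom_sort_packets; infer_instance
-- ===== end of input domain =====

-- B groups the packets by composite key with a different decomposition: compute the key list once,
-- take the distinct keys in first-occurrence order, and build each group by filtering per key
-- (A instead threads a mutable nested dict through one pass). Same cost class; objective: alternative.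

-- shared helper: packet_id = str(packet[0]) + str(packet[1])  (pyGet? is none for len < 2: Python
-- raises IndexError there, excluded by Pre_; .getD 0 is never reached inside Pre_)
def pvKey (p : List Int) : String :=
  PySem.Int.toStr ((PySem.List.pyGet? p 0).getD 0) ++ PySem.Int.toStr ((PySem.List.pyGet? p 1).getD 0)

-- ===== PORT A =====
-- one step of A's 'for packet in packets' loop over the dict packets_sorted
def pvStepA (d : PySem.Dict String (PySem.Dict String (List (List Int)))) (packet : List Int) :
    PySem.Dict String (PySem.Dict String (List (List Int))) :=
  let pid := pvKey packet
  if d.contains pid then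
    -- packets_sorted[packet_id]['raw_packets'].append(packet)
    d.modify pid PySem.Dict.empty (fun inner => inner.modify "raw_packets" [] (· ++ [packet]))
  else
    -- packets_sorted[packet_id] = {} ; packets_sorted[packet_id]['raw_packets'] = [packet]
    (d.insert pid PySem.Dict.empty).modify pid PySem.Dict.empty
      (fun inner => inner.insert "raw_packets" [packet])

def sort_packets (packets : List (List Int)) : List (String × List (String × List (List Int))) :=
  ((packets.foldl pvStepA PySem.Dict.empty).items).map (fun q => (q.1, q.2.items))

-- ===== PORT B =====
def sort_packets_alt (packets : List (List Int)) : List (String × List (String × List (List Int))) :=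
  let keys := packets.map pvKey
  (PySem.List.dedup keys).map (fun k =>
    (k, [("raw_packets", ((packets.zip keys).filter (fun pk => pk.2 == k)).map (·.1))]))

-- ===== PRECONDITION & SPEC =====
-- Pre_ excludes exactly the inputs on which Python A raises IndexError: a packet with fewer than
-- two elements (packet[0] / packet[1]).
def Pre_sort_packets (packets : List (List Int)) : Prop := ∀ p ∈ packets, 2 ≤ p.length
instance (packets : List (List Int)) : Decidable (Pre_sort_packets packets) := by unfold Pre_sort_packets; infer_instance
def pvWitness_sort_packets : List (List Int) := [[1, 2], [1, 2, 5], [3, 4]]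

def Spec_sort_packets (packets : List (List Int)) (out : List (String × List (String × List (List Int)))) : Prop := out = sort_packets_alt packets
instance (packets : List (List Int)) (out : List (String × List (String × List (List Int)))) : Decidable (Spec_sort_packets packets out) := by unfold Spec_sort_packets; infer_instance

-- ===== CLAIM (what is proved, stated in full; the proofs are below) =====
def Claim_equal_sort_packets : Prop := ∀ (packets : List (List Int)), Dom_sort_packets packets → Pre_sort_packets packets → Spec_sort_packets packets (sort_packets packets)

-- ===== LEMMAS AND PROOFS =====

-- B's inner comprehension over zip(packets, keys) is a plain filter on the key
theorem pvZipFilter (l : List (List Int)) (k : String) :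
    (((l.zip (l.map pvKey)).filter (fun pk => pk.2 == k)).map (·.1))
      = l.filter (fun p => pvKey p == k) := by
  induction l with
  | nil => rfl
  | cons x xs ih =>
    simp only [List.map_cons, List.zip_cons_cons, List.filter_cons]
    by_cases h : pvKey x = k <;> simp [h, ih]

-- the invariant of A's loop: the dict's items are, key by key in first-occurrence order,
-- the one-field inner dicts holding the filtered groups
theorem pvFoldA_items (l : List (List Int)) :
    (l.foldl pvStepA PySem.Dict.empty).items
      = (PySem.Set.ofList (l.map pvKey)).map
          (fun k => (k, PySem.Dict.mk [("raw_packets", l.filter (fun p => pvKey p == k))])) := by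
  induction l using List.reverseRecOn with
  | nil => rfl
  | append_singleton l p ih =>
    rw [List.foldl_append, List.foldl_cons, List.foldl_nil]
    set pid := pvKey p with hpid
    set D := l.foldl pvStepA PySem.Dict.empty with hD
    set ks := l.map pvKey with hks
    set S := PySem.Set.ofList ks with hS
    have hmapapp : (l ++ [p]).map pvKey = ks ++ [pid] := by simp [hks, hpid]
    have hofapp : PySem.Set.ofList ((l ++ [p]).map pvKey) = PySem.Set.add S pid := by
      rw [hmapapp, hS, PySem.Set.ofList_eq_foldl, PySem.Set.ofList_eq_foldl, List.foldl_append,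
        List.foldl_cons, List.foldl_nil]
    have hnodup : S.Nodup := PySem.Set.nodup_ofList ks
    have hkeys : D.keys = S := by
      simp [PySem.Dict.keys, ih, List.map_map, Function.comp_def]
    by_cases hmem : pid ∈ ks
    · have hmemS : pid ∈ S := (PySem.Set.mem_ofList ks pid).mpr hmem
      have hcont : D.contains pid = true := by
        simp only [PySem.Dict.contains, ih, List.any_map]
        exact List.any_eq_true.mpr ⟨pid, hmemS, by simp⟩
      have hadd : PySem.Set.add S pid = S := by
        simp [PySem.Set.add, PySem.Set.contains, hmemS]
      have hget : D.getD pid PySem.Dict.empty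
          = PySem.Dict.mk [("raw_packets", l.filter (fun q => pvKey q == pid))] := by
        apply PySem.Dict.getD_of_mem_items
        · rw [ih]; exact List.mem_map.mpr ⟨pid, hmemS, rfl⟩
        · rw [hkeys]; exact hnodup
      rw [pvStepA]
      simp only [← hpid, hcont, if_pos]
      rw [PySem.Dict.modify, hget]
      rw [hofapp, hadd]
      have hinner : (PySem.Dict.mk [("raw_packets", l.filter (fun q => pvKey q == pid))]).modify
          "raw_packets" [] (· ++ [p])
          = PySem.Dict.mk [("raw_packets", l.filter (fun q => pvKey q == pid) ++ [p])] := by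
        simp [PySem.Dict.modify, PySem.Dict.insert, PySem.Dict.contains, PySem.Dict.getD,
          PySem.Dict.get?]
      rw [hinner, PySem.Dict.items_insert]
      simp only [hcont, if_pos]
      rw [ih, List.map_map]
      refine List.map_congr_left (fun k hk => ?_)
      by_cases hkp : k = pid
      · subst hkp
        simp [List.filter_append, hpid]
      · have : (pvKey p == k) = false := beq_eq_false_iff_ne.mpr (fun h => hkp h.symm)
        simp [Function.comp, List.filter_append, this, hkp]
    · have hmemS : pid ∉ S := fun h => hmem ((PySem.Set.mem_ofList ks pid).mp h)
      have hcont : D.contains pid = false := by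
        simp only [PySem.Dict.contains, ih, List.any_map, Function.comp_def]
        refine List.any_eq_false.mpr (fun k hk => ?_)
        have hk' : k ≠ pid := fun h => hmemS (h ▸ hk)
        simp [hk']
      have hadd : PySem.Set.add S pid = S ++ [pid] := by
        simp [PySem.Set.add, hmemS]
      rw [pvStepA]
      simp only [← hpid, hcont, Bool.false_eq_true, if_false]
      rw [PySem.Dict.modify, PySem.Dict.getD_insert_self, PySem.Dict.insert_insert_self]
      have hinner : (PySem.Dict.empty : PySem.Dict String (List (List Int))).insert
          "raw_packets" [p] = PySem.Dict.mk [("raw_packets", [p])] := by rfl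
      rw [hinner, PySem.Dict.items_insert]
      simp only [hcont, Bool.false_eq_true, if_false]
      rw [hofapp, hadd, List.map_append, List.map_cons, List.map_nil, ih]
      congr 1
      · refine List.map_congr_left (fun k hk => ?_)
        have hkp : k ≠ pid := fun h => hmemS (h ▸ hk)
        have : (pvKey p == k) = false := beq_eq_false_iff_ne.mpr (fun h => hkp h.symm)
        simp [List.filter_append, this]
      · have hnil : l.filter (fun q => pvKey q == pid) = [] := by
          refine List.filter_eq_nil_iff.mpr (fun q hq => ?_)
          simp only [beq_eq_false_iff_ne, ne_eq, Bool.not_eq_true]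
          intro h
          exact hmem (h ▸ List.mem_map_of_mem hq)
        simp only [List.filter_append, hnil, List.nil_append]
        simp [hpid]

-- ===== VERDICT (by name: the statement is the Claim_ definition above) =====
theorem sort_packets_spec : Claim_equal_sort_packets := by
  intro packets _ _
  unfold Spec_sort_packets sort_packets sort_packets_alt
  rw [pvFoldA_items, List.map_map]
  simp only [PySem.List.dedup]
  refine List.map_congr_left (fun k _ => ?_)
  simp [pvZipFilter]
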